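-- pv_equiv track=rewrite | github.com/CDE90/aoc-24 | d19/d19.py | num_possible
-- ===== SOURCE A (Python) =====
-- from functools import cache
--
-- def num_possible(pattern: str, available: tuple[str, ...]) -> int:
--     @cache
--     def inner_func(pos: int) -> int:
--         # Base case: if we've matched the entire pattern
--         if pos == len(pattern):
--             return 1
--
--         # Try each available string at the current position
--         return sum(
--             int(pattern.startswith(a, pos) and inner_func(pos + len(a)))
--             for a in available
--         )
--
--     return inner_func(0)
-- ===== SOURCE B (Python) =====
-- def num_possible(pattern: str, available: tuple[str, ...]) -> int:
--     n = len(pattern)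
--     dp = [0] * (n + 1)
--     dp[n] = 1
--     for pos in range(n - 1, -1, -1):
--         dp[pos] = sum(dp[pos + len(a)] for a in available if pattern.startswith(a, pos))
--     return dp[0]
-- ===== Notes on version B (the rewrite author's own statement) =====
-- stated objective: alternative
-- what changed: Replaced the @cache top-down recursion with a bottom-up DP table over positions, filled from the end of the pattern to the front.
import Mathlib
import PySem

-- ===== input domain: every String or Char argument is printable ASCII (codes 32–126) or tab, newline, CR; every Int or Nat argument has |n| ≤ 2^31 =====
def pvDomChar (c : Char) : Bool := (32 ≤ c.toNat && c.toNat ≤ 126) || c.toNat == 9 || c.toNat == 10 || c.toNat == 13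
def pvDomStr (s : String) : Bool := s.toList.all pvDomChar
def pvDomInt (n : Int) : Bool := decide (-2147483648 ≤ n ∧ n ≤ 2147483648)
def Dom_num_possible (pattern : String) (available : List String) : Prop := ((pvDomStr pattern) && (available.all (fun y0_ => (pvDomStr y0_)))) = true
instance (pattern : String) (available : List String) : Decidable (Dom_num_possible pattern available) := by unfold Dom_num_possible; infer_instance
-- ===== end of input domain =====

-- B replaces A's @cache top-down recursion by a bottom-up DP table over positions (same values, different decomposition).

-- exact for Python `s.startswith(a, pos)` with 0 ≤ pos (Python returns False when pos > len(s))
def pyStartswithAt (s : List Char) (a : List Char) (pos : Nat) : Bool :=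
  decide (pos ≤ s.length) && ((s.drop pos).take a.length == a)

-- ===== PORT A =====
-- A's inner_func; the fuel argument only makes the recursion well-founded in Lean
-- (on inputs satisfying Pre_ the fuel pat.length is never exhausted).
def innerA (pat : List Char) (avail : List String) : Nat → Nat → Int
  | fuel, pos =>
    if pos = pat.length then 1
    else
      match fuel with
      | 0 => 0
      | f + 1 =>
        avail.foldl
          (fun s a => s + (if pyStartswithAt pat a.toList pos then innerA pat avail f (pos + a.toList.length) else 0)) 0

def num_possible (pattern : String) (available : List String) : Int :=
  innerA pattern.toList available pattern.toList.length 0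

-- ===== PORT B =====
-- one iteration of Source B's loop body: dp[pos] = sum(dp[pos+len(a)] for a in available if pattern.startswith(a, pos))
def stepB (pat : List Char) (avail : List String) (dp : List Int) (pos : Nat) : List Int :=
  dp.set pos (avail.foldl
    (fun s a => if pyStartswithAt pat a.toList pos then s + dp.getD (pos + a.toList.length) 0 else s) 0)

def num_possible_alt (pattern : String) (available : List String) : Int :=
  let pat := pattern.toList
  let n := pat.length
  let dp0 := (List.replicate (n + 1) (0 : Int)).set n 1
  let dp := (List.range n).reverse.foldl (stepB pat available) dp0
  dp.getD 0 0

-- ===== PRECONDITION & SPEC =====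
-- Pre_ excludes exactly the inputs on which A raises RecursionError:
-- a non-empty pattern together with "" in available makes inner_func recurse on itself forever.
def Pre_num_possible (pattern : String) (available : List String) : Prop :=
  pattern = "" ∨ ¬ ("" ∈ available)
instance (pattern : String) (available : List String) : Decidable (Pre_num_possible pattern available) := by
  unfold Pre_num_possible; infer_instance

def pvWitness_num_possible : String × List String := ("abab", ["a", "b", "ab"])

def Spec_num_possible (pattern : String) (available : List String) (out : Int) : Prop := out = num_possible_alt pattern available
instance (pattern : String) (available : List String) (out : Int) : Decidable (Spec_num_possible pattern available out) := by unfold Spec_num_possible; infer_instance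

-- ===== CLAIM (what is proved, stated in full; the proofs are below) =====
def Claim_equal_num_possible : Prop := ∀ (pattern : String) (available : List String), Dom_num_possible pattern available → Pre_num_possible pattern available → Spec_num_possible pattern available (num_possible pattern available)

-- ===== LEMMAS AND PROOFS =====

theorem pyStartswithAt_le {pat a : List Char} {pos : Nat}
    (h : pyStartswithAt pat a pos = true) : pos + a.length ≤ pat.length := by
  unfold pyStartswithAt at h
  simp only [Bool.and_eq_true, decide_eq_true_eq, beq_iff_eq] at h
  have hlen := congrArg List.length h.2
  simp [List.length_take, List.length_drop] at hlen
  omega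

theorem foldl_body_congr {α : Type} (l : List α) (f g : Int → α → Int)
    (H : ∀ s a, a ∈ l → f s a = g s a) : ∀ s, l.foldl f s = l.foldl g s := by
  induction l with
  | nil => intro s; rfl
  | cons a t ih =>
      intro s
      simp only [List.foldl_cons]
      rw [H s a (by simp)]
      exact ih (fun s b hb => H s b (by simp [hb])) _

theorem innerA_fuel (pat : List Char) (avail : List String)
    (hav : ∀ a ∈ avail, a.toList ≠ []) :
    ∀ f f' pos, pos ≤ pat.length → pat.length - pos ≤ f → pat.length - pos ≤ f' →
      innerA pat avail f pos = innerA pat avail f' pos := by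
  intro f
  induction f with
  | zero =>
      intro f' pos h1 h2 _
      have hple : pos = pat.length := by omega
      subst hple
      cases f' <;> simp [innerA]
  | succ f ih =>
      intro f' pos h1 h2 h3
      by_cases hp : pos = pat.length
      · subst hp
        cases f' <;> simp [innerA]
      · have hlt : pos < pat.length := by omega
        cases f' with
        | zero => omega
        | succ g =>
            show innerA pat avail (f + 1) pos = innerA pat avail (g + 1) pos
            simp only [innerA, hp, if_false]
            apply foldl_body_congr
            intro s a ha
            by_cases hs : pyStartswithAt pat a.toList pos = true
            · have hle := pyStartswithAt_le hs
              have hpos : 0 < a.toList.length := List.length_pos_iff.mpr (hav a ha)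
              simp only [hs, if_true]
              rw [ih g (pos + a.toList.length) (by omega) (by omega) (by omega)]
            · simp [hs]

-- the common value: A's inner_func at position pos
def valF (pat : List Char) (avail : List String) (pos : Nat) : Int :=
  innerA pat avail (pat.length - pos) pos

theorem valF_base (pat : List Char) (avail : List String) :
    valF pat avail pat.length = 1 := by
  simp [valF, innerA]

theorem valF_rec (pat : List Char) (avail : List String)
    (hav : ∀ a ∈ avail, a.toList ≠ []) {pos : Nat} (hpos : pos < pat.length) :
    valF pat avail pos =
      avail.foldl (fun s a => s + (if pyStartswithAt pat a.toList pos then valF pat avail (pos + a.toList.length) else 0)) 0 := by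
  have hne : pos ≠ pat.length := by omega
  have hf : pat.length - pos = (pat.length - pos - 1) + 1 := by omega
  unfold valF
  rw [hf]
  simp only [innerA, hne, if_false]
  apply foldl_body_congr
  intro s a ha
  by_cases hs : pyStartswithAt pat a.toList pos = true
  · have hle := pyStartswithAt_le hs
    have hpos' : 0 < a.toList.length := List.length_pos_iff.mpr (hav a ha)
    simp only [hs, if_true]
    rw [innerA_fuel pat avail hav (pat.length - pos - 1) (pat.length - (pos + a.toList.length))
      (pos + a.toList.length) (by omega) (by omega) (by omega)]
  · simp [hs]

theorem dp_loop (pat : List Char) (avail : List String)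
    (hav : ∀ a ∈ avail, a.toList ≠ []) :
    ∀ j, j ≤ pat.length → ∀ dp : List Int, dp.length = pat.length + 1 →
      (∀ i, j ≤ i → i ≤ pat.length → dp.getD i 0 = valF pat avail i) →
      ∀ i, i ≤ pat.length →
        ((List.range j).reverse.foldl (stepB pat avail) dp).getD i 0 = valF pat avail i := by
  intro j
  induction j with
  | zero =>
      intro _ dp _ hdp i hi
      simpa using hdp i (Nat.zero_le i) hi
  | succ j ih =>
      intro hj dp hlen hdp i hi
      rw [List.range_succ, List.reverse_append]
      simp only [List.reverse_cons, List.reverse_nil, List.nil_append, List.foldl_append, List.foldl_cons, List.foldl_nil]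
      apply ih (by omega) _ (by simp [stepB, hlen])
      · intro k hk1 hk2
        by_cases hkj : k = j
        · subst hkj
          have hklt : k < dp.length := by omega
          simp only [stepB]
          rw [List.getD_eq_getElem?_getD, List.getElem?_set_self (by omega)]
          simp only [Option.getD_some]
          rw [valF_rec pat avail hav (by omega)]
          apply foldl_body_congr
          intro s a ha
          by_cases hs : pyStartswithAt pat a.toList k = true
          · have hle := pyStartswithAt_le hs
            have hpos' : 0 < a.toList.length := List.length_pos_iff.mpr (hav a ha)
            simp only [hs, if_true]
            rw [hdp (k + a.toList.length) (by omega) (by omega)]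
          · simp [hs]
        · simp only [stepB]
          rw [List.getD_eq_getElem?_getD, List.getElem?_set_ne (by omega)]
          rw [← List.getD_eq_getElem?_getD]
          exact hdp k (by omega) hk2
      · exact hi

theorem empty_not_mem (avail : List String) (h : ¬ ("" ∈ avail)) :
    ∀ a ∈ avail, a.toList ≠ [] := by
  intro a ha hnil
  apply h
  have ha0 : a = "" := by
    exact String.toList_inj.mp (by simpa using hnil)
  rwa [ha0] at ha

-- ===== VERDICT (by name: the statement is the Claim_ definition above) =====
theorem num_possible_spec : Claim_equal_num_possible := by
  intro pattern available _ hpre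
  unfold Spec_num_possible num_possible num_possible_alt
  by_cases hemp : pattern = ""
  · subst hemp
    show innerA "".toList available "".toList.length 0 =
      ((List.range "".toList.length).reverse.foldl (stepB "".toList available)
        ((List.replicate ("".toList.length + 1) (0 : Int)).set "".toList.length 1)).getD 0 0
    simp [innerA]
  · have hav : ∀ a ∈ available, a.toList ≠ [] := by
      rcases hpre with h | h
      · exact absurd h hemp
      · exact empty_not_mem available h
    show innerA pattern.toList available pattern.toList.length 0 =
      ((List.range pattern.toList.length).reverse.foldl (stepB pattern.toList available)
        ((List.replicate (pattern.toList.length + 1) (0 : Int)).set pattern.toList.length 1)).getD 0 0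
    have hfin := dp_loop pattern.toList available hav pattern.toList.length le_rfl
      ((List.replicate (pattern.toList.length + 1) (0 : Int)).set pattern.toList.length 1)
      (by simp)
      (by
        intro i hi1 hi2
        have hieq : i = pattern.toList.length := le_antisymm hi2 hi1
        subst hieq
        rw [List.getD_eq_getElem?_getD, List.getElem?_set_self (by simp)]
        simpa using (valF_base pattern.toList available).symm)
      0 (Nat.zero_le _)
    rw [hfin]
    simp [valF]
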